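-- pv_equiv track=rewrite | github.com/sudh29/StringAlgorithms | rabinKarp.py | hashfn
-- ===== SOURCE A (Python) =====
-- def hashfn(x):
--     xdict = {"a": 1, "b": 2, "c": 3, "d": 4, "e": 5}
--     x = list(x)
--     val = 0
--     for i in range(len(x)):
--         val = val * 10
--         val += xdict[x[i]]
--     return val
-- ===== SOURCE B (Python) =====
-- def hashfn(x):
--     xdict = {"a": 1, "b": 2, "c": 3, "d": 4, "e": 5}
--     n = len(x)
--     return sum(xdict[c] * 10 ** (n - 1 - i) for i, c in enumerate(x))
-- ===== Notes on version B (the rewrite author's own statement) =====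
-- stated objective: alternative
-- what changed: Replaces the incremental Horner loop (val = val*10 + digit) by a single positional weighted sum: each character contributes xdict[c] * 10**(n-1-i), summed over enumerate(x).
import Mathlib
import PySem

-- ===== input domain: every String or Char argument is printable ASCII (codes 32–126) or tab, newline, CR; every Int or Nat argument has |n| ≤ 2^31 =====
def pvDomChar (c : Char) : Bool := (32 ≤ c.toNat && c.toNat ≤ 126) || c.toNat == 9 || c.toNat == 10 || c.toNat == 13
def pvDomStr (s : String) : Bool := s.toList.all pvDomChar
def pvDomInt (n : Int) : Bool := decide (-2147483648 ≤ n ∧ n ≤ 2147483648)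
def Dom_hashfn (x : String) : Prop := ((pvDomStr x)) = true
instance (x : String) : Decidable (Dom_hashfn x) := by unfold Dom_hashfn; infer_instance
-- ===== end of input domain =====

-- B replaces A's incremental Horner loop by a single positional weighted sum
-- sum(xdict[c] * 10**(n-1-i)); same values wherever A returns (Pre_: letters a–e only).

-- the dict literal {"a":1, …, "e":5} both Pythons build
def pvXdict : PySem.Dict Char Int :=
  PySem.Dict.ofList [('a', 1), ('b', 2), ('c', 3), ('d', 4), ('e', 5)]

-- ===== PORT A =====
-- for-loop over indices, val = val*10; val += xdict[x[i]]   (KeyError on a char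
-- outside the dict is excluded by Pre_; getD 0 stands for the successful lookup)
def hashfn (x : String) : Int :=
  x.toList.foldl (fun val c => val * 10 + pvXdict.getD c 0) 0

-- ===== PORT B =====
-- sum(xdict[c] * 10 ** (n - 1 - i) for i, c in enumerate(x))
def hashfn_alt (x : String) : Int :=
  ((PySem.List.enumerate x.toList).map
    (fun p => pvXdict.getD p.2 0 * 10 ^ (x.toList.length - 1 - p.1.toNat))).sum

-- ===== PRECONDITION & SPEC =====
-- Pre_ excludes exactly the strings with a character outside 'a'..'e', on which
-- both Pythons raise KeyError.
def Pre_hashfn (x : String) : Prop :=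
  x.toList.all (fun c => (['a', 'b', 'c', 'd', 'e'] : List Char).contains c) = true
instance (x : String) : Decidable (Pre_hashfn x) := by unfold Pre_hashfn; infer_instance
def pvWitness_hashfn : String := "abc"

def Spec_hashfn (x : String) (out : Int) : Prop := out = hashfn_alt x
instance (x : String) (out : Int) : Decidable (Spec_hashfn x out) := by unfold Spec_hashfn; infer_instance

-- ===== CLAIM (what is proved, stated in full; the proofs are below) =====
def Claim_equal_hashfn : Prop := ∀ (x : String), Dom_hashfn x → Pre_hashfn x → Spec_hashfn x (hashfn x)

-- ===== LEMMAS AND PROOFS =====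

-- tail-recursive characterisation of the value: head contributes look c * 10^(len tail)
def pvH : List Char → Int
  | [] => 0
  | c :: t => pvXdict.getD c 0 * 10 ^ t.length + pvH t

theorem pvH_foldl (l : List Char) :
    ∀ a : Int, l.foldl (fun val c => val * 10 + pvXdict.getD c 0) a
      = a * 10 ^ l.length + pvH l := by
  induction l with
  | nil => intro a; simp [pvH]
  | cons c t ih =>
    intro a
    simp only [List.foldl_cons, ih, pvH, List.length_cons]
    ring

theorem pvH_sum (l : List Char) : ∀ s : Nat,
    ((PySem.List.enumerate l (s : Int)).map
      (fun p => pvXdict.getD p.2 0 * 10 ^ (s + l.length - 1 - p.1.toNat))).sum = pvH l := by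
  induction l with
  | nil => intro s; simp [PySem.List.enumerate_nil, pvH]
  | cons c t ih =>
    intro s
    rw [PySem.List.enumerate_cons]
    simp only [List.map_cons, List.sum_cons, pvH, List.length_cons]
    have hexp : s + (t.length + 1) - 1 - ((s : Int)).toNat = t.length := by
      simp only [Int.toNat_natCast]; omega
    rw [hexp]
    congr 1
    have hfun : (fun p : Int × Char =>
        pvXdict.getD p.2 0 * 10 ^ (s + (t.length + 1) - 1 - p.1.toNat))
        = (fun p : Int × Char =>
        pvXdict.getD p.2 0 * 10 ^ ((s + 1) + t.length - 1 - p.1.toNat)) := by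
      funext p; congr 2; omega
    have : ((s : Int) + 1) = ((s + 1 : Nat) : Int) := by push_cast; ring
    rw [hfun, this, ih (s + 1)]

-- ===== VERDICT (by name: the statement is the Claim_ definition above) =====
theorem hashfn_spec : Claim_equal_hashfn := by
  intro x _ _
  unfold Spec_hashfn hashfn hashfn_alt
  rw [pvH_foldl]
  have := pvH_sum x.toList 0
  simp only [Nat.cast_zero, Nat.zero_add] at this ⊢
  rw [this]
  ring
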